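-- pv_equiv track=rewrite | github.com/komajun365/competitive_programming | others/typical90/047/main.py | calc
-- ===== SOURCE A (Python) =====
-- def z_algorithm(s):
--     n = len(s)
--     if n == 0:
--         return []
--     if type(s) is str:
--         s2 = [0] * n
--         for i, si in enumerate(s):
--             s2[i] = ord(si)
--         s = s2
--     z = [0] * n
--     j = 0
--     for i in range(1, n):
--         z[i] = 0 if (j + z[j] <= i) else min(j + z[j] - i, z[i - j])
--         while i + z[i] < n:
--             if s[z[i]] != s[i + z[i]]:
--                 break
--             z[i] += 1
--         if j + z[j] < i + z[i]:
--             j = i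
--     z[0] = n
--     return z
--
-- def calc(x,y):
--     xl = len(x)
--     yl = len(y)
--     z = x[::-1] + [9]
--     for i in range(3):
--         for j in range(yl-1,-1,-1):
--             z.append((i-y[j])%3)
--         z.append(9)
--
--     cnt = z_algorithm(z)
--     res = 0
--     for i in range(3):
--         for j in range(yl):
--             idx = xl + 1 + i * (yl+1) + j
--             if cnt[idx] >= yl - j:
--                 res += 1
--     return res
-- ===== SOURCE B (Python) =====
-- def calc(x, y):
--     # Direct counting: for each color shift i and each start j, compare the
--     # y-prefix (transformed by (i - .) % 3, read back-to-front) against the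
--     # corresponding suffix of x; no packed string, no Z-algorithm.
--     xl = len(x)
--     yl = len(y)
--     res = 0
--     for i in range(3):
--         for j in range(yl):
--             L = yl - j
--             if L <= xl and all(x[xl - 1 - p] == (i - y[yl - 1 - j - p]) % 3
--                                for p in range(L)):
--                 res += 1
--     return res
-- ===== Notes on version B (the rewrite author's own statement) =====
-- stated objective: simpler
-- what changed: Drops the packed string and the Z-algorithm entirely: B counts matches by directly comparing, for each color shift i and start j, the transformed y-prefix against the corresponding x-suffix with a plain all(...) scan.
import Mathlib
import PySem

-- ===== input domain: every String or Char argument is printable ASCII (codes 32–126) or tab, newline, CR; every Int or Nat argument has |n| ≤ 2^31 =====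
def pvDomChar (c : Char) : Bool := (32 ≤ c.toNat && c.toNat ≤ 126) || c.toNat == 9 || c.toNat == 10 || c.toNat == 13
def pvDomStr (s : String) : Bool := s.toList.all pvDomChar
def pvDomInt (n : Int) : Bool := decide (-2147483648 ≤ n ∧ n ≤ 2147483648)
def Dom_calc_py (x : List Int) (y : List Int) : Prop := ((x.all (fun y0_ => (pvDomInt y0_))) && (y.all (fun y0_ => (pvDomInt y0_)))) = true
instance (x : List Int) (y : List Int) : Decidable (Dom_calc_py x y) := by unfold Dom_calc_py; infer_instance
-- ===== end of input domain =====

-- B drops the packed string and the Z-algorithm and counts the same matches by direct scanning (simpler).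

-- ===== PORT A =====
-- the inner 'while' of z_algorithm: extend match length k while s[z[i]] == s[i+z[i]];
-- all indices accessed are < n = len(s), so List.getD is exact there
def zExtend (s : List Int) (n i k : Nat) : Nat :=
  if _h : i + k < n then
    if s.getD k 0 = s.getD (i + k) 0 then zExtend s n i (k + 1) else k
  else k
termination_by n - (i + k)
decreasing_by omega

-- one iteration of the 'for i in range(1, n)' loop of z_algorithm; state = (z, j).
-- z's entries and j are nonnegative Python ints, represented as Nat; the subtraction
-- j + z[j] - i is only taken in the branch where j + z[j] > i, so Nat subtraction is exact
def zStep (s : List Int) (n : Nat) (st : List Nat × Nat) (i : Nat) : List Nat × Nat :=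
  let z := st.1
  let j := st.2
  let seed := if j + z.getD j 0 ≤ i then 0 else min (j + z.getD j 0 - i) (z.getD (i - j) 0)
  let k := zExtend s n i seed
  let z' := z.set i k
  let j' := if j + z'.getD j 0 < i + k then i else j
  (z', j')

-- z_algorithm(s) for a list argument (the 'type(s) is str' branch never fires in calc);
-- range(1, n) is List.range' 1 (n-1)
def zAlg (s : List Int) : List Nat :=
  let n := s.length
  if n = 0 then []
  else ((List.range' 1 (n - 1)).foldl (zStep s n) (List.replicate n 0, 0)).1.set 0 n

-- calc: x[::-1] is x.reverse; 'for j in range(yl-1,-1,-1)' iterates (List.range yl).reverse;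
-- y[j] and cnt[idx] are always in range there, so List.getD is exact;
-- 'cnt[idx] >= yl - j' compared in Nat (both sides nonnegative Python ints, j < yl)
def calc_py (x : List Int) (y : List Int) : Int :=
  let xl := x.length
  let yl := y.length
  let z0 := x.reverse ++ [(9 : Int)]
  let z := (List.range 3).foldl (fun acc i =>
      ((List.range yl).reverse.foldl (fun acc2 j =>
          acc2 ++ [PySem.Int.mod ((i : Int) - y.getD j 0) 3]) acc) ++ [(9 : Int)]) z0
  let cnt := zAlg z
  (List.range 3).foldl (fun res i =>
    (List.range yl).foldl (fun res2 j =>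
      if yl - j ≤ cnt.getD (xl + 1 + i * (yl + 1) + j) 0 then res2 + 1 else res2) res) 0

-- ===== PORT B =====
-- the 'L <= xl and all(...)' condition of Source B
def bMatch (x y : List Int) (xl yl i j : Nat) : Bool :=
  decide (yl - j ≤ xl) &&
    (List.range (yl - j)).all (fun p =>
      x.getD (xl - 1 - p) 0 == PySem.Int.mod ((i : Int) - y.getD (yl - 1 - j - p) 0) 3)

def calc_py_alt (x : List Int) (y : List Int) : Int :=
  let xl := x.length
  let yl := y.length
  (List.range 3).foldl (fun res i =>
    (List.range yl).foldl (fun res2 j =>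
      if bMatch x y xl yl i j then res2 + 1 else res2) res) 0

-- ===== PRECONDITION & SPEC =====
def Spec_calc_py (x : List Int) (y : List Int) (out : Int) : Prop := out = calc_py_alt x y
instance (x : List Int) (y : List Int) (out : Int) : Decidable (Spec_calc_py x y out) := by unfold Spec_calc_py; infer_instance

-- ===== CLAIM (what is proved, stated in full; the proofs are below) =====
def Claim_equal_calc_py : Prop := ∀ (x : List Int) (y : List Int), Dom_calc_py x y → Spec_calc_py x y (calc_py x y)

-- ===== LEMMAS AND PROOFS =====

-- "the prefix of s of length k matches the substring of s starting at i"
def MAt (s : List Int) (n i k : Nat) : Prop :=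
  i + k ≤ n ∧ ∀ p, p < k → s.getD p 0 = s.getD (i + p) 0

def lcp (s : List Int) (n i : Nat) : Nat := zExtend s n i 0

theorem zExtend_ge (s : List Int) (n i k : Nat) : k ≤ zExtend s n i k := by
  induction k using zExtend.induct (s := s) (n := n) (i := i) with
  | case1 k hlt heq ih => rw [zExtend, dif_pos hlt, if_pos heq]; omega
  | case2 k hlt heq => rw [zExtend, dif_pos hlt, if_neg heq]
  | case3 k hlt => rw [zExtend, dif_neg hlt]

theorem zExtend_mat (s : List Int) (n i k : Nat) (h : MAt s n i k) : MAt s n i (zExtend s n i k) := by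
  induction k using zExtend.induct (s := s) (n := n) (i := i) with
  | case1 k hlt heq ih =>
      rw [zExtend, dif_pos hlt, if_pos heq]
      apply ih
      refine ⟨by omega, fun p hp => ?_⟩
      rcases Nat.lt_succ_iff_lt_or_eq.mp hp with h' | h'
      · exact h.2 p h'
      · subst h'; exact heq
  | case2 k hlt heq => rw [zExtend, dif_pos hlt, if_neg heq]; exact h
  | case3 k hlt => rw [zExtend, dif_neg hlt]; exact h

theorem zExtend_absorb (s : List Int) (n i k : Nat) (h : MAt s n i k) :
    zExtend s n i 0 = zExtend s n i k := by
  induction k with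
  | zero => rfl
  | succ m ih =>
      have h1 := h.1
      have hm : MAt s n i m := ⟨by omega, fun p hp => h.2 p (by omega)⟩
      rw [ih hm]
      rw [zExtend]
      have hlt : i + m < n := by omega
      rw [dif_pos hlt, if_pos (h.2 m (by omega))]

theorem lcp_ge_iff (s : List Int) (n i L : Nat) (hin : i ≤ n) :
    L ≤ lcp s n i ↔ i + L ≤ n ∧ ∀ p, p < L → s.getD p 0 = s.getD (i + p) 0 := by
  constructor
  · intro hL
    have hm : MAt s n i (lcp s n i) := zExtend_mat s n i 0 ⟨by omega, by omega⟩
    exact ⟨by have := hm.1; omega, fun p hp => hm.2 p (by omega)⟩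
  · intro ⟨hle, hmat⟩
    have : zExtend s n i 0 = zExtend s n i L := zExtend_absorb s n i L ⟨hle, hmat⟩
    unfold lcp
    rw [this]
    exact zExtend_ge s n i L

-- invariant of z_algorithm's main loop after processing i = 1 .. m-1
def ZInv (s : List Int) (n m : Nat) (st : List Nat × Nat) : Prop :=
  st.1.length = n ∧ st.2 < m ∧ MAt s n st.2 (st.1.getD st.2 0) ∧
  (∀ t, 1 ≤ t → t < m → st.1.getD t 0 = lcp s n t) ∧
  (∀ t, t < n → (t = 0 ∨ m ≤ t) → st.1.getD t 0 = 0)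

theorem getD_set_self' (l : List Nat) (i k : Nat) (h : i < l.length) : (l.set i k).getD i 0 = k := by
  simp [List.getD_eq_getElem?_getD, List.getElem?_set_self h]

theorem getD_set_ne' (l : List Nat) (i k t : Nat) (h : i ≠ t) : (l.set i k).getD t 0 = l.getD t 0 := by
  simp [List.getD_eq_getElem?_getD, List.getElem?_set_ne h]

theorem inv_step (s : List Int) (n m : Nat) (st : List Nat × Nat)
    (h : ZInv s n m st) (h1 : 1 ≤ m) (h2 : m < n) : ZInv s n (m + 1) (zStep s n st m) := by
  obtain ⟨hlen, hjm, hjmat, hdone, hzero⟩ := h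
  have hseed : MAt s n m (if st.2 + st.1.getD st.2 0 ≤ m then 0
      else min (st.2 + st.1.getD st.2 0 - m) (st.1.getD (m - st.2) 0)) := by
    split_ifs with hle
    · exact ⟨by omega, by omega⟩
    · rw [Nat.not_le] at hle
      have hj1 : 1 ≤ st.2 := by
        by_contra hj0
        have hj00 : st.2 = 0 := by omega
        have h00 := hzero 0 (by omega) (Or.inl rfl)
        rw [hj00, h00] at hle
        omega
      have hd1 : 1 ≤ m - st.2 := by omega
      have hdm : m - st.2 < m := by omega
      have hdval := hdone (m - st.2) hd1 hdm
      have hdmat : MAt s n (m - st.2) (lcp s n (m - st.2)) :=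
        zExtend_mat s n (m - st.2) 0 ⟨by omega, by omega⟩
      refine ⟨by have := hjmat.1; omega, fun p hp => ?_⟩
      have hp1 : p < lcp s n (m - st.2) := by rw [← hdval]; omega
      have e1 : s.getD p 0 = s.getD (m - st.2 + p) 0 := hdmat.2 p hp1
      have hp2 : m - st.2 + p < st.1.getD st.2 0 := by omega
      have e2 : s.getD (m - st.2 + p) 0 = s.getD (st.2 + (m - st.2 + p)) 0 := hjmat.2 _ hp2
      have e3 : st.2 + (m - st.2 + p) = m + p := by omega
      rw [e1, e2, e3]
  simp only [zStep]
  have hkmat := zExtend_mat s n m _ hseed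
  have hklcp := (zExtend_absorb s n m _ hseed).symm
  set k := zExtend s n m (if st.2 + st.1.getD st.2 0 ≤ m then 0
      else min (st.2 + st.1.getD st.2 0 - m) (st.1.getD (m - st.2) 0)) with hk
  refine ⟨by simp [hlen], ?_, ?_, ?_, ?_⟩
  · dsimp only
    split_ifs <;> omega
  · dsimp only
    split_ifs with hcond
    · rw [getD_set_self' _ _ _ (by omega : m < st.1.length)]
      exact hkmat
    · rw [getD_set_ne' _ _ _ _ (by omega : m ≠ st.2)]
      exact hjmat
  · dsimp only
    intro t ht1 ht2
    rcases Nat.lt_succ_iff_lt_or_eq.mp ht2 with h' | h'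
    · rw [getD_set_ne' _ _ _ _ (by omega : m ≠ t)]
      exact hdone t ht1 h'
    · subst h'
      rw [getD_set_self' _ _ _ (by omega : t < st.1.length)]
      exact hklcp
  · dsimp only
    intro t htn htc
    rw [getD_set_ne' _ _ _ _ (by omega : m ≠ t)]
    exact hzero t htn (by omega)

theorem inv_fold (s : List Int) (n : Nat) :
    ∀ (c a : Nat) (st : List Nat × Nat), ZInv s n a st → 1 ≤ a → a + c ≤ n →
      ZInv s n (a + c) ((List.range' a c).foldl (zStep s n) st) := by
  intro c
  induction c with
  | zero => intro a st h _ _; simpa using h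
  | succ d ih =>
      intro a st h ha hc
      rw [List.range'_succ, List.foldl_cons]
      have := ih (a + 1) (zStep s n st a) (inv_step s n a st h ha (by omega)) (by omega) (by omega)
      have e : a + (d + 1) = a + 1 + d := by omega
      rw [e]
      exact this

theorem zAlg_getD (s : List Int) (n t : Nat) (hs : s.length = n) (h1 : 1 ≤ t) (h2 : t < n) :
    (zAlg s).getD t 0 = lcp s n t := by
  have hn0 : n ≠ 0 := by omega
  have hrep : ∀ u, (List.replicate n 0).getD u 0 = 0 := by
    intro u
    rcases Nat.lt_or_ge u n with h | h
    · simp [List.getD_eq_getElem?_getD, h]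
    · simp [List.getD_eq_getElem?_getD,
        List.getElem?_eq_none_iff.mpr (by simpa using h : (List.replicate n (0:Nat)).length ≤ u)]
  have hinit : ZInv s n 1 (List.replicate n 0, 0) := by
    refine ⟨by simp, by omega, ⟨?_, ?_⟩, by omega, fun u _ _ => hrep u⟩
    · rw [hrep]; omega
    · rw [hrep]; omega
  have hfin := inv_fold s n (n - 1) 1 (List.replicate n 0, 0) hinit (by omega) (by omega)
  have e1 : 1 + (n - 1) = n := by omega
  rw [e1] at hfin
  unfold zAlg
  rw [hs]
  rw [if_neg hn0]
  rw [getD_set_ne' _ _ _ _ (by omega : 0 ≠ t)]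
  exact hfin.2.2.2.1 t h1 h2

-- the value written into color segment i at source index j of y
def mval (y : List Int) (i j : Nat) : Int := PySem.Int.mod ((i : Int) - y.getD j 0) 3

def blockL (y : List Int) (i : Nat) : List Int :=
  (List.range y.length).reverse.map (fun j => mval y i j)

-- closed form of the packed string z built in calc
def zfull (x y : List Int) : List Int :=
  x.reverse ++ (9 : Int) :: (blockL y 0 ++ (9 : Int) :: (blockL y 1 ++ (9 : Int) :: (blockL y 2 ++ [(9 : Int)])))

theorem getD_append_right' (l1 l2 : List Int) (q : Nat) (d : Int) :
    (l1 ++ l2).getD (l1.length + q) d = l2.getD q d := by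
  simp [List.getD_eq_getElem?_getD, List.getElem?_append_right (by omega : l1.length ≤ l1.length + q)]

theorem length_blockL (y : List Int) (i : Nat) : (blockL y i).length = y.length := by
  simp [blockL]

theorem length_zfull (x y : List Int) :
    (zfull x y).length = x.length + 1 + 3 * (y.length + 1) := by
  simp [zfull, length_blockL]; omega

theorem zbuild (x y : List Int) :
    (List.range 3).foldl (fun acc i =>
      ((List.range y.length).reverse.foldl (fun acc2 j =>
          acc2 ++ [PySem.Int.mod ((i : Int) - y.getD j 0) 3]) acc) ++ [(9 : Int)])
      (x.reverse ++ [(9 : Int)]) = zfull x y := by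
  have e : List.range 3 = [0, 1, 2] := by decide
  rw [e]
  simp only [PySem.List.foldl_append_singleton_eq_map]
  simp [zfull, blockL, mval]

theorem blockL_getD (y : List Int) (i q : Nat) (hq : q < y.length) :
    (blockL y i).getD q 0 = mval y i (y.length - 1 - q) := by
  have h1 : q < (blockL y i).length := by rw [length_blockL]; exact hq
  rw [List.getD_eq_getElem?_getD, List.getElem?_eq_getElem h1]
  simp only [blockL, List.getElem_map, Option.getD_some]
  congr 1
  rw [List.getElem_reverse]
  simp [List.getElem_range]

theorem zfull_getD_lt (x y : List Int) (p : Nat) (hp : p < x.length) :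
    (zfull x y).getD p 0 = x.getD (x.length - 1 - p) 0 := by
  unfold zfull
  rw [List.getD_append _ _ _ p (by simpa using hp)]
  have h1 : p < x.reverse.length := by simpa using hp
  rw [List.getD_eq_getElem?_getD, List.getElem?_eq_getElem h1, List.getElem_reverse]
  rw [List.getD_eq_getElem?_getD, List.getElem?_eq_getElem (by omega : x.length - 1 - p < x.length)]

theorem zfull_getD_sep (x y : List Int) : (zfull x y).getD x.length 0 = 9 := by
  unfold zfull
  have e : x.length = x.reverse.length + 0 := by simp
  rw [e, getD_append_right']
  simp

theorem zfull_getD_seg (x y : List Int) (i q : Nat) (hi : i < 3) (hq : q < y.length) :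
    (zfull x y).getD (x.length + 1 + i * (y.length + 1) + q) 0 = mval y i (y.length - 1 - q) := by
  unfold zfull
  interval_cases i
  · have e : x.length + 1 + 0 * (y.length + 1) + q = x.reverse.length + (q + 1) := by
      simp; omega
    rw [e, getD_append_right', List.getD_cons_succ]
    rw [List.getD_append _ _ _ q (by rw [length_blockL]; exact hq)]
    exact blockL_getD y 0 q hq
  · have e : x.length + 1 + 1 * (y.length + 1) + q =
        x.reverse.length + (((blockL y 0).length + (q + 1)) + 1) := by
      simp [length_blockL]; omega
    rw [e, getD_append_right', List.getD_cons_succ, getD_append_right', List.getD_cons_succ]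
    rw [List.getD_append _ _ _ q (by rw [length_blockL]; exact hq)]
    exact blockL_getD y 1 q hq
  · have e : x.length + 1 + 2 * (y.length + 1) + q =
        x.reverse.length + (((blockL y 0).length + (((blockL y 1).length + (q + 1)) + 1)) + 1) := by
      simp [length_blockL]; omega
    rw [e, getD_append_right', List.getD_cons_succ, getD_append_right', List.getD_cons_succ,
       getD_append_right', List.getD_cons_succ]
    rw [List.getD_append _ _ _ q (by rw [length_blockL]; exact hq)]
    exact blockL_getD y 2 q hq

theorem cond_iff (x y : List Int) (i j : Nat) (hi : i < 3) (hj : j < y.length) :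
    (y.length - j ≤ (zAlg (zfull x y)).getD (x.length + 1 + i * (y.length + 1) + j) 0)
    ↔ bMatch x y x.length y.length i j = true := by
  have hib : i * (y.length + 1) ≤ 2 * (y.length + 1) := Nat.mul_le_mul_right _ (by omega)
  have hn := length_zfull x y
  rw [zAlg_getD (zfull x y) (zfull x y).length _ rfl (by omega) (by omega)]
  rw [lcp_ge_iff _ _ _ _ (by omega)]
  simp only [bMatch, Bool.and_eq_true, decide_eq_true_eq, List.all_eq_true, List.mem_range,
    beq_iff_eq]
  have hseg : ∀ p, p < y.length - j →
      (zfull x y).getD (x.length + 1 + i * (y.length + 1) + j + p) 0 =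
        mval y i (y.length - 1 - j - p) := by
    intro p hp
    have e : x.length + 1 + i * (y.length + 1) + j + p =
        x.length + 1 + i * (y.length + 1) + (j + p) := by omega
    rw [e, zfull_getD_seg x y i (j + p) hi (by omega)]
    congr 1
    omega
  have hmb : ∀ q, 0 ≤ mval y i q ∧ mval y i q < 3 := by
    intro q
    exact ⟨PySem.Int.mod_nonneg _ (by norm_num), PySem.Int.mod_lt _ (by norm_num)⟩
  constructor
  · rintro ⟨-, hall⟩
    have hxl : y.length - j ≤ x.length := by
      by_contra hc
      have h9 := hall x.length (by omega)
      rw [zfull_getD_sep, hseg x.length (by omega)] at h9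
      have := hmb (y.length - 1 - j - x.length)
      omega
    refine ⟨hxl, fun p hp => ?_⟩
    have h := hall p hp
    rw [zfull_getD_lt x y p (by omega), hseg p hp] at h
    exact h
  · rintro ⟨hxl, hm⟩
    refine ⟨by omega, fun p hp => ?_⟩
    rw [zfull_getD_lt x y p (by omega), hseg p hp]
    exact hm p hp

theorem calc_eq (x y : List Int) : calc_py x y = calc_py_alt x y := by
  simp only [calc_py, calc_py_alt]
  rw [zbuild]
  apply List.foldl_ext
  intro r i hi
  apply List.foldl_ext
  intro r2 j hj
  rw [if_congr (cond_iff x y i j (List.mem_range.mp hi) (List.mem_range.mp hj)) rfl rfl]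

-- ===== VERDICT (by name: the statement is the Claim_ definition above) =====
theorem calc_py_spec : Claim_equal_calc_py := by
  intro x y _
  exact calc_eq x y
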